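-- pv_equiv track=rewrite | github.com/SpectraL519/cpp-argon | scripts/postprocess_doxyhtml.py | process_gfm
-- ===== SOURCE A (Python) =====
-- def process_gfm(content: str) -> str:
--     """
--     Replace GFM-style callouts with styled inline HTML spans.
--     """
--     callouts = {
--         '[!NOTE]':      ('Note', '#1e90ff', 'fa fa-info-circle'),
--         '[!TIP]':       ('Tip', '#28a745', 'fa fa-lightbulb-o'),
--         '[!IMPORTANT]': ('Important', '#d63384', 'fa fa-exclamation-circle'),
--         '[!WARNING]':   ('Warning', '#fd7e14', 'fa fa-exclamation-triangle'),
--         '[!CAUTION]':   ('Caution', '#dc3545', 'fa fa-ban'),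
--     }
--
--     for tag, (label, color, icon_class) in callouts.items():
--         replacement = (
--             f'<span style="color: {color}; font-weight: bold; font-size: 1.1em;">'
--             f'<i class="{icon_class}" style="margin-right: 6px; vertical-align: middle; font-size: 1.3em; position: relative; top: -0.08em;"></i> {label}:</span>'
--         )
--         content = content.replace(tag, replacement)
--
--     return content
-- ===== SOURCE B (Python) =====
-- def _span(label: str, color: str, icon_class: str) -> str:
--     return (
--         f'<span style="color: {color}; font-weight: bold; font-size: 1.1em;">'
--         f'<i class="{icon_class}" style="margin-right: 6px; vertical-align: middle; font-size: 1.3em; position: relative; top: -0.08em;"></i> {label}:</span>'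
--     )
--
--
-- _REPLACEMENTS = {
--     '[!NOTE]':      _span('Note', '#1e90ff', 'fa fa-info-circle'),
--     '[!TIP]':       _span('Tip', '#28a745', 'fa fa-lightbulb-o'),
--     '[!IMPORTANT]': _span('Important', '#d63384', 'fa fa-exclamation-circle'),
--     '[!WARNING]':   _span('Warning', '#fd7e14', 'fa fa-exclamation-triangle'),
--     '[!CAUTION]':   _span('Caution', '#dc3545', 'fa fa-ban'),
-- }
--
--
-- def process_gfm(content: str) -> str:
--     """
--     Replace GFM-style callouts with styled inline HTML spans, in one
--     left-to-right scan instead of five sequential full-string replace passes.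
--     """
--     out = []
--     i = 0
--     n = len(content)
--     while i < n:
--         for tag, rep in _REPLACEMENTS.items():
--             if content.startswith(tag, i):
--                 out.append(rep)
--                 i += len(tag)
--                 break
--         else:
--             out.append(content[i])
--             i += 1
--     return ''.join(out)
-- ===== Notes on version B (the rewrite author's own statement) =====
-- stated objective: alternative
-- what changed: Replaces A's five sequential full-string str.replace passes with a single left-to-right scan that, at each position, matches one of the callout tags and emits its precomputed span, or copies the character.
import Mathlib
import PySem

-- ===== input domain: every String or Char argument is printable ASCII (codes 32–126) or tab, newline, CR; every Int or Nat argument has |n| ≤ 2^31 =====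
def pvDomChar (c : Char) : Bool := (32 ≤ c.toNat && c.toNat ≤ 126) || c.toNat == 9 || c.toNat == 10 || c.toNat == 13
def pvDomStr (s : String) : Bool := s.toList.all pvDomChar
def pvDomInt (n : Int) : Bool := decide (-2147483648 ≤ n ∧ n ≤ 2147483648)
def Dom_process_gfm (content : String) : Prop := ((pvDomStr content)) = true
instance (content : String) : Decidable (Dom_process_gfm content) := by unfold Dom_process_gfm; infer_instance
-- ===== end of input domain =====

set_option maxRecDepth 8000

-- B replaces A's five sequential full-string replace passes by one left-to-right scan
-- that matches a callout tag at each position (objective: alternative, same result).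

-- ===== PORT A =====
def pvSpanA (label color icon : String) : String :=
  "<span style=\"color: " ++ color ++ "; font-weight: bold; font-size: 1.1em;\">" ++
  "<i class=\"" ++ icon ++ "\" style=\"margin-right: 6px; vertical-align: middle; font-size: 1.3em; position: relative; top: -0.08em;\"></i> " ++ label ++ ":</span>"

-- the callouts dict of A, as an association list (tag, (label, color, icon_class))
def pvCalloutsA : List (String × String × String × String) :=
  [("[!NOTE]", "Note", "#1e90ff", "fa fa-info-circle"),
   ("[!TIP]", "Tip", "#28a745", "fa fa-lightbulb-o"),
   ("[!IMPORTANT]", "Important", "#d63384", "fa fa-exclamation-circle"),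
   ("[!WARNING]", "Warning", "#fd7e14", "fa fa-exclamation-triangle"),
   ("[!CAUTION]", "Caution", "#dc3545", "fa fa-ban")]

def process_gfm (content : String) : String :=
  pvCalloutsA.foldl
    (fun acc x => PySem.Str.replace acc x.1 (pvSpanA x.2.1 x.2.2.1 x.2.2.2)) content

-- ===== PORT B =====
def pvSpanB (label color icon : String) : String :=
  "<span style=\"color: " ++ color ++ "; font-weight: bold; font-size: 1.1em;\">" ++
  "<i class=\"" ++ icon ++ "\" style=\"margin-right: 6px; vertical-align: middle; font-size: 1.3em; position: relative; top: -0.08em;\"></i> " ++ label ++ ":</span>"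

-- the while loop of Source B: one pass over the characters; the inner for/break over the
-- replacements dict becomes the if/else-if chain in dict order
def pvScanB : List Char → List Char
  | [] => []
  | c :: t =>
    if ("[!NOTE]".toList).isPrefixOf (c :: t) then
      (pvSpanB "Note" "#1e90ff" "fa fa-info-circle").toList ++ pvScanB (t.drop 6)
    else if ("[!TIP]".toList).isPrefixOf (c :: t) then
      (pvSpanB "Tip" "#28a745" "fa fa-lightbulb-o").toList ++ pvScanB (t.drop 5)
    else if ("[!IMPORTANT]".toList).isPrefixOf (c :: t) then
      (pvSpanB "Important" "#d63384" "fa fa-exclamation-circle").toList ++ pvScanB (t.drop 11)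
    else if ("[!WARNING]".toList).isPrefixOf (c :: t) then
      (pvSpanB "Warning" "#fd7e14" "fa fa-exclamation-triangle").toList ++ pvScanB (t.drop 9)
    else if ("[!CAUTION]".toList).isPrefixOf (c :: t) then
      (pvSpanB "Caution" "#dc3545" "fa fa-ban").toList ++ pvScanB (t.drop 9)
    else c :: pvScanB t
  termination_by l => l.length
  decreasing_by all_goals (simp [List.length_drop]; try omega)

def process_gfm_alt (content : String) : String := String.ofList (pvScanB content.toList)

-- ===== PRECONDITION & SPEC =====
def Spec_process_gfm (content : String) (out : String) : Prop := out = process_gfm_alt content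
instance (content : String) (out : String) : Decidable (Spec_process_gfm content out) := by unfold Spec_process_gfm; infer_instance

-- ===== CLAIM (what is proved, stated in full; the proofs are below) =====
def Claim_equal_process_gfm : Prop := ∀ (content : String), Dom_process_gfm content → Spec_process_gfm content (process_gfm content)

-- ===== LEMMAS AND PROOFS =====

-- a clean recursive form of Python's str.replace (nonempty pattern, all occurrences,
-- left to right, non-overlapping)
def pvR (old new : List Char) : List Char → List Char
  | [] => []
  | c :: t =>
    if old.isPrefixOf (c :: t) then new ++ pvR old new (t.drop (old.length - 1))
    else c :: pvR old new t
  termination_by l => l.length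
  decreasing_by all_goals (simp [List.length_drop]; try omega)

lemma pvR_nil (old new : List Char) : pvR old new [] = [] := by simp [pvR]

lemma pvR_pos (old new : List Char) (c : Char) (t : List Char) (h : old <+: c :: t) :
    pvR old new (c :: t) = new ++ pvR old new (t.drop (old.length - 1)) := by
  rw [pvR, if_pos (List.isPrefixOf_iff_prefix.mpr h)]

lemma pvR_neg (old new : List Char) (c : Char) (t : List Char) (h : ¬ old <+: c :: t) :
    pvR old new (c :: t) = c :: pvR old new t := by
  rw [pvR, if_neg (by rw [List.isPrefixOf_iff_prefix]; exact h)]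

lemma pvGo_unfold (old new : List Char) (fuel : Nat) (c : Char) (t acc : List Char) :
    PySem.Chars.replace.go old new (fuel+1) (c :: t) acc =
      (if old.isPrefixOf (c :: t)
       then PySem.Chars.replace.go old new fuel (List.drop old.length (c :: t)) (new.reverse ++ acc)
       else PySem.Chars.replace.go old new fuel t (c :: acc)) := by
  simp only [PySem.Chars.replace.go]

lemma pvGo_eq (old new : List Char) (hold : old ≠ []) :
    ∀ fuel l acc, l.length ≤ fuel →
      PySem.Chars.replace.go old new fuel l acc = acc.reverse ++ pvR old new l := by
  intro fuel
  induction fuel with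
  | zero =>
    intro l acc h
    have hl : l = [] := by cases l with | nil => rfl | cons a b => simp at h
    subst hl
    rw [pvR_nil]
    have h0 : PySem.Chars.replace.go old new 0 [] acc = acc.reverse ++ [] := rfl
    simpa using h0
  | succ n ih =>
    intro l acc h
    cases l with
    | nil =>
      rw [pvR_nil]
      have h0 : PySem.Chars.replace.go old new (n+1) [] acc = acc.reverse := by
        simp only [PySem.Chars.replace.go]
      simp [h0]
    | cons c t =>
      rw [pvGo_unfold]
      by_cases hp : old <+: c :: t
      · rw [if_pos (List.isPrefixOf_iff_prefix.mpr hp)]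
        obtain ⟨o, os, rfl⟩ : ∃ o os, old = o :: os := by
          cases old with | nil => exact absurd rfl hold | cons o os => exact ⟨o, os, rfl⟩
        have ht : t.length ≤ n := by simpa using h
        have hdrop : List.drop (o :: os).length (c :: t) = t.drop ((o :: os).length - 1) := by
          simp
        have hlen : (t.drop ((o :: os).length - 1)).length ≤ n := by
          simp only [List.length_drop]
          omega
        rw [hdrop, ih _ _ hlen, pvR_pos _ _ _ _ hp]
        simp
      · rw [if_neg (by rw [List.isPrefixOf_iff_prefix]; exact hp)]
        have ht : t.length ≤ n := by simpa using h
        rw [ih _ _ ht, pvR_neg _ _ _ _ hp]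
        simp
  
lemma pvReplace_eq (old new l : List Char) (hold : old ≠ []) :
    PySem.Chars.replace l old new = pvR old new l := by
  rw [PySem.Chars.replace, if_neg (by simp [hold])]
  simpa using pvGo_eq old new hold l.length l [] le_rfl

lemma pvStrReplace (s o n : String) (h : o.toList ≠ []) :
    (PySem.Str.replace s o n).toList = pvR o.toList n.toList s.toList := by
  simp only [PySem.Str.replace, String.toList_ofList]
  exact pvReplace_eq _ _ _ h

-- a pattern starting with '[' passes unchanged over a '['-free block
lemma pvR_passfree (old new : List Char) (ho : old.head? = some '[') :
    ∀ u v, '[' ∉ u → pvR old new (u ++ v) = u ++ pvR old new v := by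
  intro u
  induction u with
  | nil => simp
  | cons d u' ih =>
    intro v hu
    have hd : d ≠ '[' := fun hdd => hu (by simp [hdd])
    have hne : ¬ old <+: d :: (u' ++ v) := by
      intro hp
      cases old with
      | nil => simp at ho
      | cons o os =>
        have ho' : o = '[' := by simpa using ho
        exact hd ((List.cons_prefix_cons.mp hp).1 ▸ ho'.symm ▸ rfl)
    rw [List.cons_append, pvR_neg _ _ _ _ hne, ih v (fun hx => hu (List.mem_cons_of_mem _ hx))]
    simp

-- a replacement starting with '<' cannot create a '<'-free pattern occurrence at the front
lemma pvR_prefix_rev (old new : List Char) (hn : new.head? = some '<') :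
    ∀ y w, '<' ∉ w → w <+: pvR old new y → w <+: y := by
  intro y
  induction y with
  | nil =>
    intro w _ h
    rw [pvR_nil] at h
    simpa using h
  | cons c t ih =>
    intro w hw hp
    by_cases hm : old <+: c :: t
    · rw [pvR_pos _ _ _ _ hm] at hp
      cases w with
      | nil => exact List.nil_prefix
      | cons d w' =>
        exfalso
        cases new with
        | nil => simp at hn
        | cons n0 ns =>
          have hn0 : n0 = '<' := by simpa using hn
          have hd : d = n0 := (List.cons_prefix_cons.mp (by simpa using hp)).1
          exact hw (by simp [hd, hn0])
    · rw [pvR_neg _ _ _ _ hm] at hp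
      cases w with
      | nil => exact List.nil_prefix
      | cons d w' =>
        obtain ⟨hd, hp'⟩ := List.cons_prefix_cons.mp hp
        exact List.cons_prefix_cons.mpr ⟨hd, ih w' (fun hx => hw (List.mem_cons_of_mem _ hx)) hp'⟩

-- two lists that disagree at index 2: the first is no prefix of (second ++ anything)
lemma pvNotPre {a b : List Char} (x : List Char) {ca cb : Char}
    (ha : a[2]? = some ca) (hb : b[2]? = some cb) (hne : ca ≠ cb) : ¬ a <+: b ++ x := by
  rintro ⟨z, hz⟩
  have h2a : 2 < a.length := (List.getElem?_eq_some_iff.mp ha).1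
  have h2b : 2 < b.length := (List.getElem?_eq_some_iff.mp hb).1
  have hq : (a ++ z)[2]? = (b ++ x)[2]? := by rw [hz]
  rw [List.getElem?_append_left h2a, List.getElem?_append_left h2b, ha, hb] at hq
  exact hne (Option.some.inj hq)

-- tags and replacements as character lists
def pvT1 : List Char := "[!NOTE]".toList
def pvT2 : List Char := "[!TIP]".toList
def pvT3 : List Char := "[!IMPORTANT]".toList
def pvT4 : List Char := "[!WARNING]".toList
def pvT5 : List Char := "[!CAUTION]".toList
def pvRp1 : List Char := (pvSpanA "Note" "#1e90ff" "fa fa-info-circle").toList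
def pvRp2 : List Char := (pvSpanA "Tip" "#28a745" "fa fa-lightbulb-o").toList
def pvRp3 : List Char := (pvSpanA "Important" "#d63384" "fa fa-exclamation-circle").toList
def pvRp4 : List Char := (pvSpanA "Warning" "#fd7e14" "fa fa-exclamation-triangle").toList
def pvRp5 : List Char := (pvSpanA "Caution" "#dc3545" "fa fa-ban").toList

-- A's five replace passes, at the character-list level, in dict order
def pvChain (l : List Char) : List Char :=
  pvR pvT5 pvRp5 (pvR pvT4 pvRp4 (pvR pvT3 pvRp3 (pvR pvT2 pvRp2 (pvR pvT1 pvRp1 l))))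

lemma pvRp1_facts : '[' ∉ pvRp1 ∧ pvRp1.head? = some '<' := by
  rw [pvRp1, pvSpanA]; simp only [String.toList_append]; decide
lemma pvRp2_facts : '[' ∉ pvRp2 ∧ pvRp2.head? = some '<' := by
  rw [pvRp2, pvSpanA]; simp only [String.toList_append]; decide
lemma pvRp3_facts : '[' ∉ pvRp3 ∧ pvRp3.head? = some '<' := by
  rw [pvRp3, pvSpanA]; simp only [String.toList_append]; decide
lemma pvRp4_facts : '[' ∉ pvRp4 ∧ pvRp4.head? = some '<' := by
  rw [pvRp4, pvSpanA]; simp only [String.toList_append]; decide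


-- consuming the matched tag at the front
lemma pvConsume (old new X : List Char) (c : Char) (tl : List Char) (hold : old = c :: tl) :
    pvR old new (old ++ X) = new ++ pvR old new X := by
  subst hold
  rw [List.cons_append, pvR_pos _ _ _ _ ⟨X, by simp⟩]
  congr 1
  have h1 : (c :: tl).length - 1 = tl.length := by simp
  rw [h1, List.drop_left]

-- a non-matching tag passes over '[' :: tl ++ X when tl is '['-free
lemma pvPass (old new : List Char) (ho : old.head? = some '[') (tl X : List Char)
    (hbr : '[' ∉ tl) (hne : ¬ old <+: '[' :: (tl ++ X)) :
    pvR old new (('[' :: tl) ++ X) = ('[' :: tl) ++ pvR old new X := by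
  rw [List.cons_append, pvR_neg _ _ _ _ hne, pvR_passfree old new ho tl X hbr]
  simp

lemma pvPassRp1 (old new : List Char) (ho : old.head? = some '[') (X : List Char) :
    pvR old new (pvRp1 ++ X) = pvRp1 ++ pvR old new X :=
  pvR_passfree old new ho pvRp1 X pvRp1_facts.1

lemma pvPassRp2 (old new : List Char) (ho : old.head? = some '[') (X : List Char) :
    pvR old new (pvRp2 ++ X) = pvRp2 ++ pvR old new X :=
  pvR_passfree old new ho pvRp2 X pvRp2_facts.1

lemma pvPassRp3 (old new : List Char) (ho : old.head? = some '[') (X : List Char) :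
    pvR old new (pvRp3 ++ X) = pvRp3 ++ pvR old new X :=
  pvR_passfree old new ho pvRp3 X pvRp3_facts.1

lemma pvPassRp4 (old new : List Char) (ho : old.head? = some '[') (X : List Char) :
    pvR old new (pvRp4 ++ X) = pvRp4 ++ pvR old new X :=
  pvR_passfree old new ho pvRp4 X pvRp4_facts.1


lemma pvPassT12 (X : List Char) :
    pvR pvT1 pvRp1 (pvT2 ++ X) = pvT2 ++ pvR pvT1 pvRp1 X := by
  have hd : pvT2 = '[' :: "!TIP]".toList := by decide
  have hne : ¬ pvT1 <+: pvT2 ++ X :=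
    pvNotPre (ca := 'N') (cb := 'T') X (by decide) (by decide) (by decide)
  rw [hd] at hne ⊢
  exact pvPass _ _ (by decide) _ X (by decide) (by simpa using hne)

lemma pvPassT13 (X : List Char) :
    pvR pvT1 pvRp1 (pvT3 ++ X) = pvT3 ++ pvR pvT1 pvRp1 X := by
  have hd : pvT3 = '[' :: "!IMPORTANT]".toList := by decide
  have hne : ¬ pvT1 <+: pvT3 ++ X :=
    pvNotPre (ca := 'N') (cb := 'I') X (by decide) (by decide) (by decide)
  rw [hd] at hne ⊢
  exact pvPass _ _ (by decide) _ X (by decide) (by simpa using hne)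

lemma pvPassT14 (X : List Char) :
    pvR pvT1 pvRp1 (pvT4 ++ X) = pvT4 ++ pvR pvT1 pvRp1 X := by
  have hd : pvT4 = '[' :: "!WARNING]".toList := by decide
  have hne : ¬ pvT1 <+: pvT4 ++ X :=
    pvNotPre (ca := 'N') (cb := 'W') X (by decide) (by decide) (by decide)
  rw [hd] at hne ⊢
  exact pvPass _ _ (by decide) _ X (by decide) (by simpa using hne)

lemma pvPassT15 (X : List Char) :
    pvR pvT1 pvRp1 (pvT5 ++ X) = pvT5 ++ pvR pvT1 pvRp1 X := by
  have hd : pvT5 = '[' :: "!CAUTION]".toList := by decide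
  have hne : ¬ pvT1 <+: pvT5 ++ X :=
    pvNotPre (ca := 'N') (cb := 'C') X (by decide) (by decide) (by decide)
  rw [hd] at hne ⊢
  exact pvPass _ _ (by decide) _ X (by decide) (by simpa using hne)


lemma pvPassT23 (X : List Char) :
    pvR pvT2 pvRp2 (pvT3 ++ X) = pvT3 ++ pvR pvT2 pvRp2 X := by
  have hd : pvT3 = '[' :: "!IMPORTANT]".toList := by decide
  have hne : ¬ pvT2 <+: pvT3 ++ X :=
    pvNotPre (ca := 'T') (cb := 'I') X (by decide) (by decide) (by decide)
  rw [hd] at hne ⊢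
  exact pvPass _ _ (by decide) _ X (by decide) (by simpa using hne)

lemma pvPassT24 (X : List Char) :
    pvR pvT2 pvRp2 (pvT4 ++ X) = pvT4 ++ pvR pvT2 pvRp2 X := by
  have hd : pvT4 = '[' :: "!WARNING]".toList := by decide
  have hne : ¬ pvT2 <+: pvT4 ++ X :=
    pvNotPre (ca := 'T') (cb := 'W') X (by decide) (by decide) (by decide)
  rw [hd] at hne ⊢
  exact pvPass _ _ (by decide) _ X (by decide) (by simpa using hne)

lemma pvPassT25 (X : List Char) :
    pvR pvT2 pvRp2 (pvT5 ++ X) = pvT5 ++ pvR pvT2 pvRp2 X := by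
  have hd : pvT5 = '[' :: "!CAUTION]".toList := by decide
  have hne : ¬ pvT2 <+: pvT5 ++ X :=
    pvNotPre (ca := 'T') (cb := 'C') X (by decide) (by decide) (by decide)
  rw [hd] at hne ⊢
  exact pvPass _ _ (by decide) _ X (by decide) (by simpa using hne)



lemma pvPassT34 (X : List Char) :
    pvR pvT3 pvRp3 (pvT4 ++ X) = pvT4 ++ pvR pvT3 pvRp3 X := by
  have hd : pvT4 = '[' :: "!WARNING]".toList := by decide
  have hne : ¬ pvT3 <+: pvT4 ++ X :=
    pvNotPre (ca := 'I') (cb := 'W') X (by decide) (by decide) (by decide)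
  rw [hd] at hne ⊢
  exact pvPass _ _ (by decide) _ X (by decide) (by simpa using hne)

lemma pvPassT35 (X : List Char) :
    pvR pvT3 pvRp3 (pvT5 ++ X) = pvT5 ++ pvR pvT3 pvRp3 X := by
  have hd : pvT5 = '[' :: "!CAUTION]".toList := by decide
  have hne : ¬ pvT3 <+: pvT5 ++ X :=
    pvNotPre (ca := 'I') (cb := 'C') X (by decide) (by decide) (by decide)
  rw [hd] at hne ⊢
  exact pvPass _ _ (by decide) _ X (by decide) (by simpa using hne)




lemma pvPassT45 (X : List Char) :
    pvR pvT4 pvRp4 (pvT5 ++ X) = pvT5 ++ pvR pvT4 pvRp4 X := by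
  have hd : pvT5 = '[' :: "!CAUTION]".toList := by decide
  have hne : ¬ pvT4 <+: pvT5 ++ X :=
    pvNotPre (ca := 'W') (cb := 'C') X (by decide) (by decide) (by decide)
  rw [hd] at hne ⊢
  exact pvPass _ _ (by decide) _ X (by decide) (by simpa using hne)





lemma pvConsT1 (X : List Char) :
    pvR pvT1 pvRp1 (pvT1 ++ X) = pvRp1 ++ pvR pvT1 pvRp1 X :=
  pvConsume pvT1 pvRp1 X '[' ("!NOTE]".toList) (by decide)

lemma pvConsT2 (X : List Char) :
    pvR pvT2 pvRp2 (pvT2 ++ X) = pvRp2 ++ pvR pvT2 pvRp2 X :=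
  pvConsume pvT2 pvRp2 X '[' ("!TIP]".toList) (by decide)

lemma pvConsT3 (X : List Char) :
    pvR pvT3 pvRp3 (pvT3 ++ X) = pvRp3 ++ pvR pvT3 pvRp3 X :=
  pvConsume pvT3 pvRp3 X '[' ("!IMPORTANT]".toList) (by decide)

lemma pvConsT4 (X : List Char) :
    pvR pvT4 pvRp4 (pvT4 ++ X) = pvRp4 ++ pvR pvT4 pvRp4 X :=
  pvConsume pvT4 pvRp4 X '[' ("!WARNING]".toList) (by decide)

lemma pvConsT5 (X : List Char) :
    pvR pvT5 pvRp5 (pvT5 ++ X) = pvRp5 ++ pvR pvT5 pvRp5 X :=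
  pvConsume pvT5 pvRp5 X '[' ("!CAUTION]".toList) (by decide)

lemma pvChain_m1 (rest : List Char) :
    pvChain (pvT1 ++ rest) = pvRp1 ++ pvChain rest := by
  unfold pvChain
  rw [pvConsT1, pvPassRp1 pvT2 pvRp2 (by decide), pvPassRp1 pvT3 pvRp3 (by decide), pvPassRp1 pvT4 pvRp4 (by decide), pvPassRp1 pvT5 pvRp5 (by decide)]

lemma pvChain_m2 (rest : List Char) :
    pvChain (pvT2 ++ rest) = pvRp2 ++ pvChain rest := by
  unfold pvChain
  rw [pvPassT12, pvConsT2, pvPassRp2 pvT3 pvRp3 (by decide), pvPassRp2 pvT4 pvRp4 (by decide), pvPassRp2 pvT5 pvRp5 (by decide)]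

lemma pvChain_m3 (rest : List Char) :
    pvChain (pvT3 ++ rest) = pvRp3 ++ pvChain rest := by
  unfold pvChain
  rw [pvPassT13, pvPassT23, pvConsT3, pvPassRp3 pvT4 pvRp4 (by decide), pvPassRp3 pvT5 pvRp5 (by decide)]

lemma pvChain_m4 (rest : List Char) :
    pvChain (pvT4 ++ rest) = pvRp4 ++ pvChain rest := by
  unfold pvChain
  rw [pvPassT14, pvPassT24, pvPassT34, pvConsT4, pvPassRp4 pvT5 pvRp5 (by decide)]

lemma pvChain_m5 (rest : List Char) :
    pvChain (pvT5 ++ rest) = pvRp5 ++ pvChain rest := by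
  unfold pvChain
  rw [pvPassT15, pvPassT25, pvPassT35, pvPassT45, pvConsT5]

lemma pvChain_no (c : Char) (t : List Char)
    (h1 : ¬ pvT1 <+: c :: t) (h2 : ¬ pvT2 <+: c :: t) (h3 : ¬ pvT3 <+: c :: t)
    (h4 : ¬ pvT4 <+: c :: t) (h5 : ¬ pvT5 <+: c :: t) :
    pvChain (c :: t) = c :: pvChain t := by
  unfold pvChain
  have n2 : ¬ pvT2 <+: c :: pvR pvT1 pvRp1 t := by
    intro hp
    apply h2
    have s1 : pvT2 <+: pvR pvT1 pvRp1 ((c :: t)) := by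
      rw [pvR_neg _ _ _ _ h1]
      exact hp
    exact pvR_prefix_rev pvT1 pvRp1 pvRp1_facts.2 _ _ (by decide) (s1)
  have n3 : ¬ pvT3 <+: c :: pvR pvT2 pvRp2 (pvR pvT1 pvRp1 t) := by
    intro hp
    apply h3
    have s1 : pvT3 <+: pvR pvT2 pvRp2 (pvR pvT1 pvRp1 ((c :: t))) := by
      rw [pvR_neg _ _ _ _ h1, pvR_neg _ _ _ _ n2]
      exact hp
    exact pvR_prefix_rev pvT1 pvRp1 pvRp1_facts.2 _ _ (by decide) (pvR_prefix_rev pvT2 pvRp2 pvRp2_facts.2 _ _ (by decide) (s1))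
  have n4 : ¬ pvT4 <+: c :: pvR pvT3 pvRp3 (pvR pvT2 pvRp2 (pvR pvT1 pvRp1 t)) := by
    intro hp
    apply h4
    have s1 : pvT4 <+: pvR pvT3 pvRp3 (pvR pvT2 pvRp2 (pvR pvT1 pvRp1 ((c :: t)))) := by
      rw [pvR_neg _ _ _ _ h1, pvR_neg _ _ _ _ n2, pvR_neg _ _ _ _ n3]
      exact hp
    exact pvR_prefix_rev pvT1 pvRp1 pvRp1_facts.2 _ _ (by decide) (pvR_prefix_rev pvT2 pvRp2 pvRp2_facts.2 _ _ (by decide) (pvR_prefix_rev pvT3 pvRp3 pvRp3_facts.2 _ _ (by decide) (s1)))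
  have n5 : ¬ pvT5 <+: c :: pvR pvT4 pvRp4 (pvR pvT3 pvRp3 (pvR pvT2 pvRp2 (pvR pvT1 pvRp1 t))) := by
    intro hp
    apply h5
    have s1 : pvT5 <+: pvR pvT4 pvRp4 (pvR pvT3 pvRp3 (pvR pvT2 pvRp2 (pvR pvT1 pvRp1 ((c :: t))))) := by
      rw [pvR_neg _ _ _ _ h1, pvR_neg _ _ _ _ n2, pvR_neg _ _ _ _ n3, pvR_neg _ _ _ _ n4]
      exact hp
    exact pvR_prefix_rev pvT1 pvRp1 pvRp1_facts.2 _ _ (by decide) (pvR_prefix_rev pvT2 pvRp2 pvRp2_facts.2 _ _ (by decide) (pvR_prefix_rev pvT3 pvRp3 pvRp3_facts.2 _ _ (by decide) (pvR_prefix_rev pvT4 pvRp4 pvRp4_facts.2 _ _ (by decide) (s1))))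
  rw [pvR_neg _ _ _ _ h1, pvR_neg _ _ _ _ n2, pvR_neg _ _ _ _ n3, pvR_neg _ _ _ _ n4, pvR_neg _ _ _ _ n5]

lemma pvScan_m1 (rest : List Char) :
    pvScanB (pvT1 ++ rest) = pvRp1 ++ pvScanB rest := by
  have hd : pvT1 = '[' :: "!NOTE]".toList := by decide
  rw [hd, List.cons_append, pvScanB]
  rw [if_pos (by
      rw [List.isPrefixOf_iff_prefix, ← List.cons_append, ← hd]
      exact ⟨rest, rfl⟩)]
  rw [List.drop_left' (by decide : ("!NOTE]".toList).length = 6)]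
  rfl

lemma pvScan_m2 (rest : List Char) :
    pvScanB (pvT2 ++ rest) = pvRp2 ++ pvScanB rest := by
  have hd : pvT2 = '[' :: "!TIP]".toList := by decide
  rw [hd, List.cons_append, pvScanB]
  rw [if_neg (by
      rw [List.isPrefixOf_iff_prefix, ← List.cons_append, ← hd]
      exact pvNotPre (ca := 'N') (cb := 'T') rest (by decide) (by decide) (by decide)), if_pos (by
      rw [List.isPrefixOf_iff_prefix, ← List.cons_append, ← hd]
      exact ⟨rest, rfl⟩)]
  rw [List.drop_left' (by decide : ("!TIP]".toList).length = 5)]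
  rfl

lemma pvScan_m3 (rest : List Char) :
    pvScanB (pvT3 ++ rest) = pvRp3 ++ pvScanB rest := by
  have hd : pvT3 = '[' :: "!IMPORTANT]".toList := by decide
  rw [hd, List.cons_append, pvScanB]
  rw [if_neg (by
      rw [List.isPrefixOf_iff_prefix, ← List.cons_append, ← hd]
      exact pvNotPre (ca := 'N') (cb := 'I') rest (by decide) (by decide) (by decide)), if_neg (by
      rw [List.isPrefixOf_iff_prefix, ← List.cons_append, ← hd]
      exact pvNotPre (ca := 'T') (cb := 'I') rest (by decide) (by decide) (by decide)), if_pos (by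
      rw [List.isPrefixOf_iff_prefix, ← List.cons_append, ← hd]
      exact ⟨rest, rfl⟩)]
  rw [List.drop_left' (by decide : ("!IMPORTANT]".toList).length = 11)]
  rfl

lemma pvScan_m4 (rest : List Char) :
    pvScanB (pvT4 ++ rest) = pvRp4 ++ pvScanB rest := by
  have hd : pvT4 = '[' :: "!WARNING]".toList := by decide
  rw [hd, List.cons_append, pvScanB]
  rw [if_neg (by
      rw [List.isPrefixOf_iff_prefix, ← List.cons_append, ← hd]
      exact pvNotPre (ca := 'N') (cb := 'W') rest (by decide) (by decide) (by decide)), if_neg (by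
      rw [List.isPrefixOf_iff_prefix, ← List.cons_append, ← hd]
      exact pvNotPre (ca := 'T') (cb := 'W') rest (by decide) (by decide) (by decide)), if_neg (by
      rw [List.isPrefixOf_iff_prefix, ← List.cons_append, ← hd]
      exact pvNotPre (ca := 'I') (cb := 'W') rest (by decide) (by decide) (by decide)), if_pos (by
      rw [List.isPrefixOf_iff_prefix, ← List.cons_append, ← hd]
      exact ⟨rest, rfl⟩)]
  rw [List.drop_left' (by decide : ("!WARNING]".toList).length = 9)]
  rfl

lemma pvScan_m5 (rest : List Char) :
    pvScanB (pvT5 ++ rest) = pvRp5 ++ pvScanB rest := by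
  have hd : pvT5 = '[' :: "!CAUTION]".toList := by decide
  rw [hd, List.cons_append, pvScanB]
  rw [if_neg (by
      rw [List.isPrefixOf_iff_prefix, ← List.cons_append, ← hd]
      exact pvNotPre (ca := 'N') (cb := 'C') rest (by decide) (by decide) (by decide)), if_neg (by
      rw [List.isPrefixOf_iff_prefix, ← List.cons_append, ← hd]
      exact pvNotPre (ca := 'T') (cb := 'C') rest (by decide) (by decide) (by decide)), if_neg (by
      rw [List.isPrefixOf_iff_prefix, ← List.cons_append, ← hd]
      exact pvNotPre (ca := 'I') (cb := 'C') rest (by decide) (by decide) (by decide)), if_neg (by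
      rw [List.isPrefixOf_iff_prefix, ← List.cons_append, ← hd]
      exact pvNotPre (ca := 'W') (cb := 'C') rest (by decide) (by decide) (by decide)), if_pos (by
      rw [List.isPrefixOf_iff_prefix, ← List.cons_append, ← hd]
      exact ⟨rest, rfl⟩)]
  rw [List.drop_left' (by decide : ("!CAUTION]".toList).length = 9)]
  rfl

lemma pvScan_no (c : Char) (t : List Char)
    (h1 : ¬ pvT1 <+: c :: t) (h2 : ¬ pvT2 <+: c :: t) (h3 : ¬ pvT3 <+: c :: t)
    (h4 : ¬ pvT4 <+: c :: t) (h5 : ¬ pvT5 <+: c :: t) :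
    pvScanB (c :: t) = c :: pvScanB t := by
  rw [pvScanB]
  rw [if_neg (by rw [List.isPrefixOf_iff_prefix]; exact h1), if_neg (by rw [List.isPrefixOf_iff_prefix]; exact h2), if_neg (by rw [List.isPrefixOf_iff_prefix]; exact h3), if_neg (by rw [List.isPrefixOf_iff_prefix]; exact h4), if_neg (by rw [List.isPrefixOf_iff_prefix]; exact h5)]

lemma pvMain : ∀ (n : Nat) (l : List Char), l.length ≤ n → pvChain l = pvScanB l := by
  intro n
  induction n with
  | zero =>
    intro l h
    have hl : l = [] := by cases l with | nil => rfl | cons a b => simp at h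
    subst hl
    simp [pvChain, pvR_nil, pvScanB]
  | succ n ih =>
    intro l h
    by_cases h1 : pvT1 <+: l
    · obtain ⟨rest, rfl⟩ := h1
      have hlen : pvT1.length = 7 := by decide
      rw [List.length_append, hlen] at h
      rw [pvChain_m1, pvScan_m1, ih rest (by omega)]
    by_cases h2 : pvT2 <+: l
    · obtain ⟨rest, rfl⟩ := h2
      have hlen : pvT2.length = 6 := by decide
      rw [List.length_append, hlen] at h
      rw [pvChain_m2, pvScan_m2, ih rest (by omega)]
    by_cases h3 : pvT3 <+: l
    · obtain ⟨rest, rfl⟩ := h3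
      have hlen : pvT3.length = 12 := by decide
      rw [List.length_append, hlen] at h
      rw [pvChain_m3, pvScan_m3, ih rest (by omega)]
    by_cases h4 : pvT4 <+: l
    · obtain ⟨rest, rfl⟩ := h4
      have hlen : pvT4.length = 10 := by decide
      rw [List.length_append, hlen] at h
      rw [pvChain_m4, pvScan_m4, ih rest (by omega)]
    by_cases h5 : pvT5 <+: l
    · obtain ⟨rest, rfl⟩ := h5
      have hlen : pvT5.length = 10 := by decide
      rw [List.length_append, hlen] at h
      rw [pvChain_m5, pvScan_m5, ih rest (by omega)]
    cases l with
    | nil => simp [pvChain, pvR_nil, pvScanB]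
    | cons c t =>
      rw [pvChain_no c t h1 h2 h3 h4 h5, pvScan_no c t h1 h2 h3 h4 h5,
          ih t (by simp at h; omega)]


theorem pv_toplevel : ∀ (content : String), process_gfm content = process_gfm_alt content := by
  intro content
  apply String.toList_inj.mp
  have hA : (process_gfm content).toList = pvChain content.toList := by
    simp only [process_gfm, pvCalloutsA, List.foldl]
    rw [pvStrReplace _ _ _ (by decide), pvStrReplace _ _ _ (by decide),
        pvStrReplace _ _ _ (by decide), pvStrReplace _ _ _ (by decide),
        pvStrReplace _ _ _ (by decide)]
    rfl
  have hB : (process_gfm_alt content).toList = pvScanB content.toList := by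
    simp [process_gfm_alt]
  rw [hA, hB]
  exact pvMain content.toList.length content.toList le_rfl

-- ===== VERDICT (by name: the statement is the Claim_ definition above) =====
theorem process_gfm_spec : Claim_equal_process_gfm := by
  intro content _
  exact pv_toplevel content
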